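-- pv_equiv track=rewrite | github.com/halecakir/NLG | codes/scripts/smali_tool.py | extract_permission_by_contentp
-- ===== SOURCE A (Python) =====
-- def extract_permission_by_contentp(method):
--     """Find methods that invoke content providers."""
--     def is_exist(keyword, lst):
--         for line in lst:
--             if keyword.lower() in line.lower():
--                 return True
--         return False
--     permission_methods = []
--     exist_cr = is_exist("ContentResolver", method)
--     exist_q = is_exist("query", method)
--     exist_c = is_exist("contact", method)
--     if exist_cr and exist_q and exist_c:
--         permission_methods.append((method[0], "READ_CONTACTS"))
--     return permission_methods
-- ===== SOURCE B (Python) =====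
-- def extract_permission_by_contentp(method):
--     """Find methods that invoke content providers (single-pass flag tracking)."""
--     seen_cr = seen_q = seen_c = False
--     for line in method:
--         low = line.lower()
--         seen_cr = seen_cr or "contentresolver" in low
--         seen_q = seen_q or "query" in low
--         seen_c = seen_c or "contact" in low
--     if seen_cr and seen_q and seen_c:
--         return [(method[0], "READ_CONTACTS")]
--     return []
-- ===== Notes on version B (the rewrite author's own statement) =====
-- stated objective: faster
-- what changed: Replaced three separate early-exit scans through a nested helper by one pass over the lines maintaining three booleans (each line is lowercased once instead of up to three times), with the result built directly instead of via an accumulator list.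
import Mathlib
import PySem

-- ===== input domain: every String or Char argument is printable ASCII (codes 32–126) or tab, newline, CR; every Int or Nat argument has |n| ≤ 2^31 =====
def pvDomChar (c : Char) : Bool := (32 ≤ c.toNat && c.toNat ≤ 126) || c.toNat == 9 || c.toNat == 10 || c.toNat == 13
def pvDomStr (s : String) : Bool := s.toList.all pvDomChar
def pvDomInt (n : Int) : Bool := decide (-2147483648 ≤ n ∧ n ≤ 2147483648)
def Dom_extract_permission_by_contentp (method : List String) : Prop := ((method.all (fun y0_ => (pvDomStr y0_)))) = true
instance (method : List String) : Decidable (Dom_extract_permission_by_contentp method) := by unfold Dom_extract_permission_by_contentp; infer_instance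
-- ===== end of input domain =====

-- B replaces A's three separate early-exit keyword scans by one pass tracking three booleans (objective: faster — each line lowercased once, single traversal).
-- ===== PORT A =====
-- inner helper is_exist(keyword, lst)
def pvIsExist (keyword : String) : List String → Bool
  | [] => false
  | line :: rest =>
      if PySem.Str.isIn (PySem.Str.lower keyword) (PySem.Str.lower line) then true
      else pvIsExist keyword rest

def extract_permission_by_contentp (method : List String) : List (String × String) :=
  let permission_methods : List (String × String) := []
  let exist_cr := pvIsExist "ContentResolver" method
  let exist_q := pvIsExist "query" method
  let exist_c := pvIsExist "contact" method
  if exist_cr && exist_q && exist_c then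
    -- method[0]: only reached when the flags hold, hence method ≠ []
    permission_methods ++ [(PySem.List.pyGetD method 0 "", "READ_CONTACTS")]
  else permission_methods

-- ===== PORT B =====
def extract_permission_by_contentp_alt (method : List String) : List (String × String) :=
  let st := method.foldl
    (fun (s : Bool × Bool × Bool) line =>
      let low := PySem.Str.lower line
      (s.1 || PySem.Str.isIn "contentresolver" low,
       s.2.1 || PySem.Str.isIn "query" low,
       s.2.2 || PySem.Str.isIn "contact" low))
    (false, false, false)
  if st.1 && st.2.1 && st.2.2 then
    [(PySem.List.pyGetD method 0 "", "READ_CONTACTS")]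
  else []

-- ===== PRECONDITION & SPEC =====
def Spec_extract_permission_by_contentp (method : List String) (out : List (String × String)) : Prop := out = extract_permission_by_contentp_alt method
instance (method : List String) (out : List (String × String)) : Decidable (Spec_extract_permission_by_contentp method out) := by unfold Spec_extract_permission_by_contentp; infer_instance

-- ===== CLAIM (what is proved, stated in full; the proofs are below) =====
def Claim_equal_extract_permission_by_contentp : Prop := ∀ (method : List String), Dom_extract_permission_by_contentp method → Spec_extract_permission_by_contentp method (extract_permission_by_contentp method)

-- ===== LEMMAS AND PROOFS =====
-- B's single-pass fold computes exactly A's three scans (disjoined into the initial flags)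
theorem pvFold_eq (method : List String) (a b c : Bool) :
    method.foldl
      (fun (s : Bool × Bool × Bool) line =>
        let low := PySem.Str.lower line
        (s.1 || PySem.Str.isIn "contentresolver" low,
         s.2.1 || PySem.Str.isIn "query" low,
         s.2.2 || PySem.Str.isIn "contact" low))
      (a, b, c)
    = (a || pvIsExist "ContentResolver" method,
       b || pvIsExist "query" method,
       c || pvIsExist "contact" method) := by
  induction method generalizing a b c with
  | nil => simp [pvIsExist]
  | cons line rest ih =>
      have h1 : PySem.Str.lower "ContentResolver" = "contentresolver" := by decide
      have h2 : PySem.Str.lower "query" = "query" := by decide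
      have h3 : PySem.Str.lower "contact" = "contact" := by decide
      simp only [List.foldl_cons, ih, pvIsExist, h1, h2, h3]
      by_cases hcr : PySem.Str.isIn "contentresolver" (PySem.Str.lower line) <;>
        by_cases hq : PySem.Str.isIn "query" (PySem.Str.lower line) <;>
          by_cases hc : PySem.Str.isIn "contact" (PySem.Str.lower line) <;>
            simp_all


-- ===== VERDICT (by name: the statement is the Claim_ definition above) =====
theorem extract_permission_by_contentp_spec : Claim_equal_extract_permission_by_contentp := by
  intro method _
  unfold Spec_extract_permission_by_contentp
  unfold extract_permission_by_contentp extract_permission_by_contentp_alt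
  simp only [pvFold_eq method false false false, Bool.false_or, List.nil_append]
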